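-- pv_equiv track=rewrite | github.com/sandesh-argon/atlas | archive/legacy/v2.0/phaseA/A1_missingness_analysis/diagnostics/validate_domain_coverage.py | classify_indicator
-- ===== SOURCE A (Python) =====
-- def classify_indicator(name, keywords_dict):
--     """Classify indicator based on keywords in name"""
--     name_lower = name.lower()
--
--     # Score each domain
--     scores = {}
--     for domain, keywords in keywords_dict.items():
--         score = sum(1 for kw in keywords if kw.lower() in name_lower)
--         if score > 0:
--             scores[domain] = score
--
--     if not scores:
--         return 'Other', 0
--
--     # Return domain with highest score
--     best_domain = max(scores, key=scores.get)
--     return best_domain, scores[best_domain]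
-- ===== SOURCE B (Python) =====
-- def classify_indicator(name, keywords_dict):
--     """Classify indicator based on keywords in name.
--
--     Single pass: keep a running (best_domain, best_score), starting at
--     ('Other', 0); a strict '>' update reproduces the first-seen tie-break
--     and the all-zero default, with no scores dict and no max() pass.
--     """
--     name_lower = name.lower()
--     best_domain, best_score = 'Other', 0
--     for domain, keywords in keywords_dict.items():
--         score = sum(kw.lower() in name_lower for kw in keywords)
--         if score > best_score:
--             best_domain, best_score = domain, score
--     return best_domain, best_score
-- ===== Notes on version B (the rewrite author's own statement) =====
-- stated objective: simpler
-- what changed: B replaces A's two-phase scheme (build a dict of positive scores, then a max() pass with a lookup) by a single fused pass keeping a running (best_domain, best_score) initialized to ('Other', 0) and updated only on strictly greater score; Pre_ excludes association lists with duplicate domain keys, which do not denote a unique Python dict (dict construction merges duplicates), so the representation-level behaviour there is accidental.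
import Mathlib
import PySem

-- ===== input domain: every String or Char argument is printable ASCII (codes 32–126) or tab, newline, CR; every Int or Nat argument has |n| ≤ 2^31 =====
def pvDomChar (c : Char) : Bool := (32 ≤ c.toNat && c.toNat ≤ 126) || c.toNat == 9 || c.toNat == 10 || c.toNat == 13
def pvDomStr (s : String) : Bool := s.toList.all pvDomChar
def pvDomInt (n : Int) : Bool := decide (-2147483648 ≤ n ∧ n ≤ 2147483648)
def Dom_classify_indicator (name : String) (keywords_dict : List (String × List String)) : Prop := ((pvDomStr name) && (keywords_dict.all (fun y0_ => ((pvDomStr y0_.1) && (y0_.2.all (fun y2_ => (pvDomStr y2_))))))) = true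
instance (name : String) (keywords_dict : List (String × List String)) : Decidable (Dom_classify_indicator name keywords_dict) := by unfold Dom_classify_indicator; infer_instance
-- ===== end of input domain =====

-- B fuses A's two phases (a dict of positive scores, then a max() pass with a lookup)
-- into one pass with a running (best_domain, best_score); objective: simpler.

-- ===== PORT A =====
def classify_indicator (name : String) (keywords_dict : List (String × List String)) : String × Int :=
  let name_lower := PySem.Str.lower name
  -- scores = {}; for domain, keywords in keywords_dict.items(): …
  let scores : PySem.Dict String Int :=
    keywords_dict.foldl (fun sc p =>
      let score : Int :=
        (p.2.map (fun kw => if PySem.Str.isIn (PySem.Str.lower kw) name_lower then (1 : Int) else 0)).sum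
      if score > 0 then sc.insert p.1 score else sc) PySem.Dict.empty
  if scores.items.isEmpty then ("Other", 0)
  else
    -- best_domain = max(scores, key=scores.get); the none branch is unreachable under the guard
    match PySem.List.max? scores.keys (fun k => scores.getD k 0) with
    | none => ("Other", 0)
    | some best_domain => (best_domain, scores.getD best_domain 0)

-- ===== PORT B =====
def classify_indicator_alt (name : String) (keywords_dict : List (String × List String)) : String × Int :=
  let name_lower := PySem.Str.lower name
  keywords_dict.foldl (fun best p =>
    let score : Int := (p.2.countP (fun kw => PySem.Str.isIn (PySem.Str.lower kw) name_lower) : Nat)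
    if best.2 < score then (p.1, score) else best) ("Other", 0)

-- ===== PRECONDITION & SPEC =====
-- Pre_ excludes association lists with duplicate domain keys: they do not denote a unique
-- Python dict (dict construction merges duplicates), so behaviour there is a representation artefact.
def Pre_classify_indicator (name : String) (keywords_dict : List (String × List String)) : Prop :=
  (keywords_dict.map Prod.fst).Nodup
instance (name : String) (keywords_dict : List (String × List String)) : Decidable (Pre_classify_indicator name keywords_dict) := by unfold Pre_classify_indicator; infer_instance
def pvWitness_classify_indicator : String × (List (String × List String)) :=
  ("cost of insulin", [("Health", ["insulin", "vaccine"]), ("Energy", ["fuel"])])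
def Spec_classify_indicator (name : String) (keywords_dict : List (String × List String)) (out : String × Int) : Prop := out = classify_indicator_alt name keywords_dict
instance (name : String) (keywords_dict : List (String × List String)) (out : String × Int) : Decidable (Spec_classify_indicator name keywords_dict out) := by unfold Spec_classify_indicator; infer_instance

-- ===== CLAIM (what is proved, stated in full; the proofs are below) =====
def Claim_equal_classify_indicator : Prop := ∀ (name : String) (keywords_dict : List (String × List String)), Dom_classify_indicator name keywords_dict → Pre_classify_indicator name keywords_dict → Spec_classify_indicator name keywords_dict (classify_indicator name keywords_dict)

-- ===== LEMMAS AND PROOFS =====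

-- a loop that conditionally updates is the loop over the filtered list
theorem pv_foldl_ite_filter {α β : Type} (g : β → α → β) (p : α → Prop) [DecidablePred p] :
    ∀ (l : List α) (b : β),
      l.foldl (fun b x => if p x then g b x else b) b = (l.filter (fun x => decide (p x))).foldl g b := by
  intro l
  induction l with
  | nil => intro b; rfl
  | cons x t ih =>
      intro b
      by_cases h : p x <;> simp [h, ih]

-- max? over a mapped list
theorem pv_max?_map {α β : Type} (g : α → β) (key : β → Int) :
    ∀ (l : List α), PySem.List.max? (l.map g) key = Option.map g (PySem.List.max? l (fun x => key (g x))) := by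
  have step : ∀ (l : List α) (acc : Option α),
      (l.map g).foldl (fun acc x => match acc with
        | none => some x
        | some m => if key m < key x then some x else some m) (Option.map g acc)
      = Option.map g (l.foldl (fun acc x => match acc with
        | none => some x
        | some m => if key (g m) < key (g x) then some x else some m) acc) := by
    intro l
    induction l with
    | nil => intro acc; rfl
    | cons x t ih =>
        intro acc
        cases acc with
        | none => simpa using ih (some x)
        | some m =>
            by_cases h : key (g m) < key (g x)
            · simp only [List.map_cons, List.foldl_cons, Option.map_some, if_pos h]
              simpa using ih (some x)
            · simp only [List.map_cons, List.foldl_cons, Option.map_some, if_neg h]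
              simpa using ih (some m)
  intro l
  simpa [PySem.List.max?] using step l none

-- max? only looks at the key on members of the list
theorem pv_max?_congr {α : Type} (k1 k2 : α → Int) :
    ∀ (l : List α), (∀ x ∈ l, k1 x = k2 x) → PySem.List.max? l k1 = PySem.List.max? l k2 := by
  have step : ∀ (l : List α) (acc : Option α), (∀ x ∈ l, k1 x = k2 x) →
      (∀ m, acc = some m → k1 m = k2 m) →
      l.foldl (fun acc x => match acc with
        | none => some x
        | some m => if k1 m < k1 x then some x else some m) acc
      = l.foldl (fun acc x => match acc with
        | none => some x
        | some m => if k2 m < k2 x then some x else some m) acc := by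
    intro l
    induction l with
    | nil => intro acc _ _; rfl
    | cons x t ih =>
        intro acc hl hacc
        cases acc with
        | none =>
            simp only [List.foldl_cons]
            exact ih (some x) (fun y hy => hl y (by simp [hy])) (fun m hm => by
              cases hm; exact hl x (by simp))
        | some m =>
            have hm : k1 m = k2 m := hacc m rfl
            have hx : k1 x = k2 x := hl x (by simp)
            simp only [List.foldl_cons, hm, hx]
            by_cases h : k2 m < k2 x
            · simp only [if_pos h]
              exact ih (some x) (fun y hy => hl y (by simp [hy])) (fun m' hm' => by cases hm'; exact hx)
            · simp only [if_neg h]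
              exact ih (some m) (fun y hy => hl y (by simp [hy])) (fun m' hm' => by cases hm'; exact hm)
  intro l h
  exact step l none h (by intro m hm; cases hm)

-- max? of a nonempty list is the strict-greater running fold
theorem pv_max?_cons {α : Type} (key : α → Int) (p : α) (t : List α) :
    PySem.List.max? (p :: t) key = some (t.foldl (fun m x => if key m < key x then x else m) p) := by
  have step : ∀ (t : List α) (m : α),
      t.foldl (fun acc x => match acc with
        | none => some x
        | some m => if key m < key x then some x else some m) (some m)
      = some (t.foldl (fun m x => if key m < key x then x else m) m) := by
    intro t
    induction t with
    | nil => intro m; rfl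
    | cons x s ih => intro m; by_cases h : key m < key x <;> simp [h, ih]
  simpa [PySem.List.max?] using step t p

-- B's running-best fold, once started, mirrors the argmax fold
theorem pv_fold_pair {α : Type} (f : α → Int) (name1 : α → String) :
    ∀ (l : List α) (m : α),
      l.foldl (fun best p => if best.2 < f p then (name1 p, f p) else best) (name1 m, f m)
      = (let r := l.foldl (fun m x => if f m < f x then x else m) m; (name1 r, f r)) := by
  intro l
  induction l with
  | nil => intro m; rfl
  | cons x t ih => intro m; by_cases h : f m < f x <;> simp [h, ih]

-- elements with nonpositive score never update a nonnegative running best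
theorem pv_fold_skip {α : Type} (f : α → Int) (name1 : α → String) (hf : ∀ p, 0 ≤ f p) :
    ∀ (l : List α) (b : String × Int), 0 ≤ b.2 →
      l.foldl (fun best p => if best.2 < f p then (name1 p, f p) else best) b
      = (l.filter (fun p => decide (0 < f p))).foldl
          (fun best p => if best.2 < f p then (name1 p, f p) else best) b := by
  intro l
  induction l with
  | nil => intro b _; rfl
  | cons x t ih =>
      intro b hb
      by_cases h : 0 < f x
      · have hfilter : List.filter (fun p => decide (0 < f p)) (x :: t)
            = x :: List.filter (fun p => decide (0 < f p)) t := by simp [h]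
        rw [hfilter]
        simp only [List.foldl_cons]
        by_cases h2 : b.2 < f x
        · rw [if_pos h2]; exact ih _ (le_of_lt h)
        · rw [if_neg h2]; exact ih _ hb
      · have h2 : ¬ b.2 < f x := by
          have := hf x
          omega
        simp only [List.foldl_cons, if_neg h2, List.filter_cons, decide_eq_false h]
        exact ih _ hb

theorem classify_indicator_eq (name : String) (kd : List (String × List String))
    (hpre : (kd.map Prod.fst).Nodup) :
    classify_indicator name kd = classify_indicator_alt name kd := by
  set nl := PySem.Str.lower name with hnl
  set f : String × List String → Int :=
    fun p => ((p.2.countP (fun kw => PySem.Str.isIn (PySem.Str.lower kw) nl) : Nat) : Int) with hf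
  have hfnn : ∀ p, 0 ≤ f p := by intro p; simp [hf]
  -- A's per-item score is f
  have hscore : ∀ p : String × List String,
      ((p.2.map (fun kw => if PySem.Str.isIn (PySem.Str.lower kw) nl then (1 : Int) else 0)).sum) = f p := by
    intro p
    simpa [hf] using PySem.List.sum_map_ite_one_zero (fun kw => PySem.Str.isIn (PySem.Str.lower kw) nl) p.2
  set fl := kd.filter (fun p => decide (0 < f p)) with hfl
  have hsub : (fl.map Prod.fst).Nodup := by
    exact hpre.sublist (List.Sublist.map Prod.fst List.filter_sublist)
  -- A's scores dict, characterized
  have hA : classify_indicator name kd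
      = (let scores : PySem.Dict String Int := fl.foldl (fun sc p => sc.insert p.1 (f p)) PySem.Dict.empty
         if scores.items.isEmpty then ("Other", 0)
         else match PySem.List.max? scores.keys (fun k => scores.getD k 0) with
           | none => ("Other", 0)
           | some best => (best, scores.getD best 0)) := by
    have hfun : (fun (sc : PySem.Dict String Int) (p : String × List String) =>
        if ((p.2.map (fun kw => if PySem.Str.isIn (PySem.Str.lower kw) nl then (1 : Int) else 0)).sum) > 0
        then sc.insert p.1 ((p.2.map (fun kw => if PySem.Str.isIn (PySem.Str.lower kw) nl then (1 : Int) else 0)).sum)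
        else sc)
        = (fun sc p => if 0 < f p then sc.insert p.1 (f p) else sc) := by
      funext sc p
      rw [hscore p]
    simp only [classify_indicator]
    rw [← hnl, hfun,
      pv_foldl_ite_filter (fun sc p => sc.insert p.1 (f p)) (fun p => 0 < f p) kd PySem.Dict.empty]
  have hitems : (fl.foldl (fun sc p => sc.insert p.1 (f p)) PySem.Dict.empty).items
      = fl.map (fun p => (p.1, f p)) := by
    have := PySem.Dict.items_foldl_insert_fresh fl (fun p => p.1) (fun p => f p) PySem.Dict.empty
      (by intro a _; simp) hsub
    simpa using this
  set scores : PySem.Dict String Int := fl.foldl (fun sc p => sc.insert p.1 (f p)) PySem.Dict.empty with hsc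
  have hkeys : scores.keys = fl.map Prod.fst := by
    simp only [PySem.Dict.keys, hitems]
    simp [List.map_map, Function.comp]
  have hkeysnd : scores.keys.Nodup := by rw [hkeys]; exact hsub
  have hgetD : ∀ p ∈ fl, scores.getD p.1 0 = f p := by
    intro p hp
    have hmem : (p.1, f p) ∈ scores.items := by rw [hitems]; exact List.mem_map_of_mem hp
    exact PySem.Dict.getD_of_get?_eq_some scores 0 (PySem.Dict.get?_of_mem_items scores hmem hkeysnd)
  -- B, reduced to a fold over fl
  have hB : classify_indicator_alt name kd
      = fl.foldl (fun best p => if best.2 < f p then (p.1, f p) else best) ("Other", 0) := by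
    show kd.foldl (fun best p => if best.2 < f p then (p.1, f p) else best) ("Other", 0) = _
    rw [pv_fold_skip f Prod.fst hfnn kd ("Other", 0) (by norm_num)]
  rw [hA, hB]
  cases hflc : fl with
  | nil =>
      have hie : scores.items = [] := by rw [hitems, hflc]; simp
      simp [hie]
  | cons p t =>
      have hfl' : fl = p :: t := hflc
      have hne : ¬ scores.items.isEmpty := by
        simp [hitems, hflc]
      simp only [if_neg hne]
      -- the max? side
      rw [hkeys]
      rw [pv_max?_map Prod.fst (fun k => scores.getD k 0) fl]
      rw [pv_max?_congr (fun p => scores.getD p.1 0) f fl hgetD]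
      rw [hflc, pv_max?_cons f p t]
      set r := t.foldl (fun m x => if f m < f x then x else m) p with hr
      have hrmem : r ∈ fl := by
        have := PySem.List.max?_mem (xs := fl) (key := f) (m := r)
          (by rw [hflc, pv_max?_cons f p t])
        exact this
      simp only [Option.map_some]
      rw [hgetD r hrmem]
      -- the fold side
      have hp0 : (0 : Int) < f p := by
        have : p ∈ kd.filter (fun p => decide (0 < f p)) := by rw [← hfl]; rw [hflc]; simp
        simpa using (List.of_mem_filter this)
      have hstep : (List.foldl (fun best p => if best.2 < f p then (p.1, f p) else best) ("Other", 0) (p :: t))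
          = t.foldl (fun best p => if best.2 < f p then (p.1, f p) else best) (p.1, f p) := by
        simp [hp0]
      rw [hstep, pv_fold_pair f Prod.fst t p]

-- ===== VERDICT (by name: the statement is the Claim_ definition above) =====
theorem classify_indicator_spec : Claim_equal_classify_indicator := by
  intro name kd _ hpre
  unfold Spec_classify_indicator
  exact classify_indicator_eq name kd hpre
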